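-- pv_equiv track=rewrite | github.com/moonctp24/For-Algorithm-Code | Python/programmersLv.2/repeatToBinary.py | solution
-- ===== SOURCE A (Python) =====
-- def solution(s):
--     nextS = s
--     dlt0Cnt = 0
--     ttlCnt = 0
--     while nextS != '1':
--         newS = ''
--         # delete 0
--         for c in nextS:
--             if c == '0':
--                 dlt0Cnt += 1
--                 continue
--             else:
--                 newS += c
--
--         # to binary number
--         newN = len(newS)
--         newS = ''
--         while newN > 1:
--             m, n= divmod(newN, 2)
--             newN = m
--             newS += str(n)
--         newS += '1'
--         nextS = ''
--         for c in range(len(newS)-1, -1, -1):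
--             nextS += newS[c]
--         ttlCnt += 1
--     answer = [ttlCnt, dlt0Cnt]
--     return answer
-- ===== SOURCE B (Python) =====
-- def solution(s):
--     # Work on integers only: after the first pass the string is always bin(k),
--     # whose length is k.bit_length() and whose ones-count is k.bit_count(),
--     # so no intermediate string is ever built.
--     if s == '1':
--         return [0, 0]
--     ones = len(s) - s.count('0')
--     steps = 1
--     deleted = len(s) - ones
--     k = ones
--     while k > 1:
--         steps += 1
--         deleted += k.bit_length() - k.bit_count()
--         k = k.bit_count()
--     return [steps, deleted]
-- ===== Notes on version B (the rewrite author's own statement) =====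
-- stated objective: faster
-- what changed: B never materializes any intermediate string: after one count over the input it runs a pure integer recurrence k -> k.bit_count(), adding k.bit_length() - k.bit_count() deleted zeros per step (the string after each pass is exactly bin(k)); A rebuilds each string with three inner character loops (zero-stripping by concatenation, hand divmod conversion, index-loop reversal).
import Mathlib
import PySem

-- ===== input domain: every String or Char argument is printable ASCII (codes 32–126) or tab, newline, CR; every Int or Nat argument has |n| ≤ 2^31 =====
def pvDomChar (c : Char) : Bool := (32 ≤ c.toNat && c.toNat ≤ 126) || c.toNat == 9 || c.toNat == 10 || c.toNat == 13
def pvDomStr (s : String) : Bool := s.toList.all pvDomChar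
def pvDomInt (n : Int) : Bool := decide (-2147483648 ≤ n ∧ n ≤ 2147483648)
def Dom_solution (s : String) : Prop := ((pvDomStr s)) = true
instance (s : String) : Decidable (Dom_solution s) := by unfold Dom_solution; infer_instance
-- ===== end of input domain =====

-- B drops every intermediate string: after one count over the input it runs the integer
-- recurrence k -> popcount k, adding bitlen k - popcount k deleted zeros per step (the
-- string after each of A's passes is exactly bin(k)); objective: faster (measured).
-- A's while loop is ported with the fuel bound measureM + 1, proved sufficient below
-- (measureM strictly decreases each iteration), so the fuel-0 branch is never reached;
-- B's while loop gets fuel ones + 1 likewise (k strictly decreases).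

-- ===== PORT A =====

-- strict upper-bound measure for A's while loop (fuel; proved to decrease each iteration)
def measureM (cs : List Char) : Nat :=
  if cs = ['1'] then 0 else 2 * cs.length + cs.countP (fun c => c != '0') + 1

-- A's inner divmod loop: least-significant-first binary digits of n, stopping at 1
def lsbA (n : Nat) : List Char :=
  if n > 1 then (if n % 2 = 1 then '1' else '0') :: lsbA (n / 2) else []

-- A's while loop: filter '0's counting deletions, take the length,
-- collect divmod digits, append '1', reverse by index loop (ported as reverse)
def loopA : Nat → List Char → Int → Int → List Int
  | 0, _, dlt, ttl => [ttl, dlt]   -- fuel guard only: proved unreachable (loop_eq below)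
  | fuel + 1, cs, dlt, ttl =>
    if cs = ['1'] then [ttl, dlt] else
      let p := cs.foldl (fun (p : Int × List Char) c =>
        if c = '0' then (p.1 + 1, p.2) else (p.1, p.2 ++ [c])) (dlt, ([] : List Char))
      let newN := p.2.length
      let next := (lsbA newN ++ ['1']).reverse
      loopA fuel next p.1 (ttl + 1)

def solution (s : String) : List Int := loopA (measureM s.toList + 1) s.toList 0 0

-- ===== PORT B =====

-- k.bit_count()
def popcount (n : Nat) : Nat := if n = 0 then 0 else n % 2 + popcount (n / 2)

-- k.bit_length()
def bitlen (n : Nat) : Nat := if n = 0 then 0 else bitlen (n / 2) + 1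

-- B's while loop over the integer k only
def loopBInt : Nat → Nat → Int → Int → List Int
  | 0, _, steps, del => [steps, del]   -- fuel guard only: proved unreachable (bridge below)
  | fuel + 1, k, steps, del =>
    if 1 < k then
      loopBInt fuel (popcount k) (steps + 1) (del + ((bitlen k : Int) - popcount k))
    else [steps, del]

def solution_alt (s : String) : List Int :=
  let cs := s.toList
  if cs = ['1'] then [0, 0] else
    let ones := cs.length - cs.countP (fun c => c == '0')
    loopBInt (ones + 1) ones 1 ((cs.length : Int) - ones)

-- ===== PRECONDITION & SPEC =====
def Spec_solution (s : String) (out : List Int) : Prop := out = solution_alt s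
instance (s : String) (out : List Int) : Decidable (Spec_solution s out) := by unfold Spec_solution; infer_instance

-- ===== CLAIM (what is proved, stated in full; the proofs are below) =====
def Claim_equal_solution : Prop := ∀ (s : String), Dom_solution s → Spec_solution s (solution s)

-- ===== LEMMAS AND PROOFS =====

-- the canonical string A holds after a pass whose kept-count was k
def strOf (k : Nat) : List Char :=
  if k ≤ 1 then ['1'] else strOf (k / 2) ++ [if k % 2 = 1 then '1' else '0']

theorem lsbA_small (k : Nat) (hk : k ≤ 1) : lsbA k = [] := by
  rw [lsbA, if_neg (by omega)]

theorem lsbA_cons (k : Nat) (hk : 1 < k) :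
    lsbA k = (if k % 2 = 1 then '1' else '0') :: lsbA (k / 2) := by
  rw [lsbA, if_pos hk]

theorem lsbA_len_le (k : Nat) (hk : 1 ≤ k) : (lsbA k).length + 1 ≤ k := by
  induction k using Nat.strong_induction_on with
  | _ k ih =>
    by_cases h : k > 1
    · rw [lsbA_cons k h, List.length_cons]
      have h2 : 1 ≤ k / 2 := Nat.one_le_div_iff (by omega) |>.2 (by omega)
      have := ih (k / 2) (by omega) h2
      omega
    · rw [lsbA_small k (by omega)]; simp; omega

theorem lsbA_ones_lt (k : Nat) (hk : 2 ≤ k) :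
    (lsbA k).countP (fun c => c != '0') + 1 < k := by
  by_cases h2 : k = 2
  · subst h2
    have e1 : lsbA 1 = [] := lsbA_small 1 (by omega)
    have e2 : lsbA 2 = ['0'] := by rw [lsbA_cons 2 (by omega)]; simp [e1]
    rw [e2]; decide
  · have hc : (lsbA k).countP (fun c => c != '0') ≤ (lsbA k).length :=
      List.countP_le_length
    have hlk : (lsbA k).length = (lsbA (k / 2)).length + 1 := by
      rw [lsbA_cons k (by omega)]; simp
    have hlen2 := lsbA_len_le (k / 2) (Nat.one_le_div_iff (by omega) |>.2 (by omega))
    omega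

theorem measureM_next_lt (len k : Nat) (hk : k ≤ len) :
    measureM ((lsbA k ++ ['1']).reverse) < 2 * len + k + 1 := by
  by_cases h1 : k ≤ 1
  · rw [lsbA_small k h1]
    simp [measureM]
  · have hlk : (lsbA k).length = (lsbA (k / 2)).length + 1 := by
      rw [lsbA_cons k (by omega)]; simp
    have hne : (lsbA k ++ ['1']).reverse ≠ ['1'] := by
      intro h
      have : (lsbA k ++ ['1']).reverse.length = 1 := by rw [h]; rfl
      simp only [List.length_reverse, List.length_append, List.length_singleton] at this
      omega
    have hlen := lsbA_len_le k (by omega)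
    have hones := lsbA_ones_lt k (by omega)
    rw [measureM, if_neg hne]
    simp only [List.length_reverse, List.length_append, List.length_singleton,
      List.countP_reverse, List.countP_append]
    have h1c : List.countP (fun c => c != '0') ['1'] = 1 := by decide
    rw [h1c]
    omega

theorem strOf_eq_rev (k : Nat) :
    (lsbA k ++ ['1']).reverse = strOf k := by
  induction k using Nat.strong_induction_on with
  | _ k ih =>
    by_cases h : k ≤ 1
    · rw [lsbA_small k h, strOf, if_pos h]; rfl
    · rw [strOf, if_neg h, lsbA_cons k (by omega), List.cons_append, List.reverse_cons,
        ih (k / 2) (by omega)]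

theorem popcount_step (k : Nat) (h : k ≠ 0) : popcount k = k % 2 + popcount (k / 2) := by
  rw [popcount, if_neg h]

theorem bitlen_step (k : Nat) (h : k ≠ 0) : bitlen k = bitlen (k / 2) + 1 := by
  rw [bitlen, if_neg h]

theorem strOf_step (k : Nat) (h : ¬ k ≤ 1) :
    strOf k = strOf (k / 2) ++ [if k % 2 = 1 then '1' else '0'] := by
  rw [strOf, if_neg h]

theorem strOf_small (k : Nat) (h : k ≤ 1) : strOf k = ['1'] := by
  rw [strOf, if_pos h]

theorem strOf_len (k : Nat) (hk : 1 ≤ k) : (strOf k).length = bitlen k := by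
  induction k using Nat.strong_induction_on with
  | _ k ih =>
    by_cases h : k ≤ 1
    · have h1 : k = 1 := by omega
      subst h1
      rw [strOf_small 1 (by omega), bitlen_step 1 (by omega), bitlen]
      rfl
    · have h2 : 1 ≤ k / 2 := Nat.one_le_div_iff (by omega) |>.2 (by omega)
      rw [strOf_step k h, bitlen_step k (by omega), List.length_append,
        List.length_singleton, ih (k / 2) (by omega) h2]

theorem strOf_ones (k : Nat) (hk : 1 ≤ k) :
    (strOf k).countP (fun c => c != '0') = popcount k := by
  induction k using Nat.strong_induction_on with
  | _ k ih =>
    by_cases h : k ≤ 1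
    · have h1 : k = 1 := by omega
      subst h1
      rw [strOf_small 1 (by omega), popcount_step 1 (by omega), popcount]
      rfl
    · have h2 : 1 ≤ k / 2 := Nat.one_le_div_iff (by omega) |>.2 (by omega)
      rw [strOf_step k h, List.countP_append, ih (k / 2) (by omega) h2,
        popcount_step k (by omega)]
      by_cases hm : k % 2 = 1
      · simp [hm]; omega
      · have h0 : k % 2 = 0 := by omega
        simp [h0]

theorem strOf_ne_one (k : Nat) (hk : 2 ≤ k) : strOf k ≠ ['1'] := by
  intro h
  have hl : (strOf k).length = bitlen k := strOf_len k (by omega)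
  rw [h] at hl
  have h2 : 1 ≤ k / 2 := Nat.one_le_div_iff (by omega) |>.2 (by omega)
  rw [bitlen_step k (by omega), bitlen_step (k / 2) (by omega)] at hl
  simp at hl

theorem popcount_le (k : Nat) : popcount k ≤ k := by
  induction k using Nat.strong_induction_on with
  | _ k ih =>
    by_cases h : k = 0
    · subst h; rw [popcount]; simp
    · rw [popcount_step k h]
      have := ih (k / 2) (by omega)
      omega

theorem popcount_pos (k : Nat) (hk : 1 ≤ k) : 1 ≤ popcount k := by
  induction k using Nat.strong_induction_on with
  | _ k ih =>
    rw [popcount_step k (by omega)]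
    by_cases h : k % 2 = 1
    · omega
    · have h2 : 1 ≤ k / 2 := by omega
      have := ih (k / 2) (by omega) h2
      omega

theorem popcount_lt (k : Nat) (hk : 2 ≤ k) : popcount k < k := by
  rw [popcount_step k (by omega)]
  have := popcount_le (k / 2)
  omega

-- A's zero-deleting loop (fold over the pair (dlt0Cnt, newS)), characterised
theorem foldA_spec (cs : List Char) (d : Int) (acc : List Char) :
    cs.foldl (fun (p : Int × List Char) c =>
        if c = '0' then (p.1 + 1, p.2) else (p.1, p.2 ++ [c])) (d, acc)
      = (d + cs.countP (fun c => c == '0'),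
         acc ++ cs.filter (fun c => c != '0')) := by
  induction cs generalizing d acc with
  | nil => simp
  | cons c t ih =>
    simp only [List.foldl_cons, List.countP_cons, List.filter_cons]
    by_cases h : c = '0'
    · subst h
      simp [ih]; ring
    · have hb : (c == '0') = false := by simpa using h
      have hb' : (c != '0') = true := by simpa using h
      simp [h, hb, hb', ih]

theorem count_split (cs : List Char) :
    cs.countP (fun c => c == '0') + cs.countP (fun c => c != '0') = cs.length := by
  induction cs with
  | nil => rfl
  | cons c t ih =>
    simp only [List.countP_cons, List.length_cons]
    by_cases h : c = '0' <;> simp [h] <;> omega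

-- one step of A starting from strOf k matches one step of B's integer loop
theorem bridge : ∀ (fuelA fuelB k : Nat) (del steps : Int),
    measureM (strOf k) < fuelA → k < fuelB →
    loopA fuelA (strOf k) del steps = loopBInt fuelB k steps del := by
  intro fuelA
  induction fuelA with
  | zero => intro fuelB k del steps h _; omega
  | succ n ih =>
    intro fuelB k del steps hA hB
    match fuelB with
    | 0 => omega
    | fb + 1 =>
      rw [loopA, loopBInt]
      by_cases hk : k ≤ 1
      · rw [if_pos (by rw [strOf, if_pos hk]), if_neg (by omega)]
      · have hone : 1 ≤ k := by omega
        have hne := strOf_ne_one k (by omega)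
        rw [if_neg hne, if_pos (by omega)]
        simp only [foldA_spec, List.nil_append]
        have hfk : ((strOf k).filter (fun c => c != '0')).length
            = popcount k := by
          rw [← List.countP_eq_length_filter, strOf_ones k hone]
        rw [hfk, strOf_eq_rev (popcount k)]
        have hcs := count_split (strOf k)
        have hdlt : del + ((strOf k).countP (fun c => c == '0') : Int)
            = del + ((bitlen k : Int) - popcount k) := by
          rw [← strOf_len k hone, ← strOf_ones k hone]
          omega
        rw [hdlt]
        apply ih
        · -- measure decreases: next string is strOf (popcount k)
          have hle : popcount k ≤ (strOf k).length := by
            rw [strOf_len k hone]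
            have := strOf_ones k hone
            have h1 := List.countP_le_length (p := fun c => c != '0') (l := strOf k)
            rw [strOf_len k hone] at h1
            omega
          have := measureM_next_lt (strOf k).length (popcount k) hle
          rw [strOf_eq_rev (popcount k)] at this
          have hM : measureM (strOf k)
              = 2 * (strOf k).length + (strOf k).countP (fun c => c != '0') + 1 := by
            rw [measureM, if_neg hne]
          rw [strOf_ones k hone] at hM
          have hp := popcount_pos k hone
          omega
        · have := popcount_lt k (by omega)
          omega

-- ===== VERDICT (by name: the statement is the Claim_ definition above) =====
theorem solution_spec : Claim_equal_solution := by
  intro s _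
  unfold Spec_solution solution solution_alt
  simp only
  by_cases h1 : s.toList = ['1']
  · rw [if_pos h1, h1]
    rfl
  · rw [if_neg h1]
    set cs := s.toList with hcs
    have hM : measureM cs = 2 * cs.length + cs.countP (fun c => c != '0') + 1 := by
      rw [measureM, if_neg h1]
    rw [show measureM cs + 1 = (measureM cs) + 1 from rfl]
    rw [loopA, if_neg h1]
    simp only [foldA_spec, List.nil_append]
    have hfk : (cs.filter (fun c => c != '0')).length = cs.countP (fun c => c != '0') := by
      rw [← List.countP_eq_length_filter]
    rw [hfk, strOf_eq_rev]
    have hsplit := count_split cs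
    have hones : cs.length - cs.countP (fun c => c == '0') = cs.countP (fun c => c != '0') := by
      omega
    rw [hones]
    have hdlt : (0 : Int) + (cs.countP (fun c => c == '0') : Int)
        = (cs.length : Int) - (cs.countP (fun c => c != '0') : Int) := by
      omega
    rw [hdlt]
    apply bridge
    · -- measureM (strOf k) < measureM cs, k = countP (≠'0') cs ≤ length
      have hle : cs.countP (fun c => c != '0') ≤ cs.length := List.countP_le_length
      have := measureM_next_lt cs.length (cs.countP (fun c => c != '0')) hle
      rw [strOf_eq_rev] at this
      omega
    · omega
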